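-- pv_equiv track=rewrite | github.com/foxpilot64/bookbot | main.py | charnum
-- ===== SOURCE A (Python) =====
-- def charnum(text):
--     lowered_text = text.lower()
--     char_counts = {} #Store counts in a dictionary
--
--
--     #Count each char in lowered_text:
--     for char in lowered_text:
--         if char.isalpha():
--             if char in char_counts:
--                 char_counts[char] += 1
--             else:
--                 char_counts[char] = 1
--
--
--     return char_counts
-- ===== SOURCE B (Python) =====
-- def charnum(text):
--     lowered = text.lower()
--     keys = dict.fromkeys(c for c in lowered if c.isalpha())
--     return {c: lowered.count(c) for c in keys}
-- ===== Notes on version B (the rewrite author's own statement) =====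
-- stated objective: alternative
-- what changed: A makes one accumulating pass updating a dict entry per character; B first builds the distinct alphabetic characters in first-occurrence order (dict.fromkeys) and then counts each one with str.count over the lowered text.
import Mathlib
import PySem

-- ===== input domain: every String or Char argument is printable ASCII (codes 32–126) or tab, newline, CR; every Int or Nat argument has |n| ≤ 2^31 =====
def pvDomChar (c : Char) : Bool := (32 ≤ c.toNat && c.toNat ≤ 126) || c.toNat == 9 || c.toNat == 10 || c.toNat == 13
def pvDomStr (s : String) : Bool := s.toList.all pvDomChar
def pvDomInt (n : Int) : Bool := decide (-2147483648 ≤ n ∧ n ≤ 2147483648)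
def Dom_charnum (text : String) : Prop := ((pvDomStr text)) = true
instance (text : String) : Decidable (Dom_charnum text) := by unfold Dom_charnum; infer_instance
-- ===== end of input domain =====

-- B replaces A's single accumulating dict pass by a two-phase strategy (dedup the alphabetic
-- keys in first-occurrence order, then count each with str.count); same return value as A.

-- ===== PORT A =====
-- single accumulating pass: for each alphabetic char of the lowered text, bump its dict entry
def charnum (text : String) : List (String × Int) :=
  (List.foldl
    (fun (d : PySem.Dict String Int) (c : Char) =>
      if PySem.Chars.strIsalpha [c] then
        match d.get? (String.ofList [c]) with
        | some v => d.insert (String.ofList [c]) (v + 1)   -- char in char_counts: += 1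
        | none   => d.insert (String.ofList [c]) 1          -- else: = 1
      else d)
    PySem.Dict.empty (PySem.Str.lower text).toList).items

-- ===== PORT B =====
-- build the distinct alphabetic chars in first-occurrence order (dict.fromkeys), then count each
def charnum_alt (text : String) : List (String × Int) :=
  let lowered := (PySem.Str.lower text).toList
  let keys := PySem.List.dedup (lowered.filter (fun c => PySem.Chars.strIsalpha [c]))
  keys.map (fun c => (String.ofList [c], (PySem.Chars.count lowered [c] : Int)))

-- ===== PRECONDITION & SPEC =====
def Spec_charnum (text : String) (out : List (String × Int)) : Prop := out = charnum_alt text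
instance (text : String) (out : List (String × Int)) : Decidable (Spec_charnum text out) := by unfold Spec_charnum; infer_instance

-- ===== CLAIM (what is proved, stated in full; the proofs are below) =====
def Claim_equal_charnum : Prop := ∀ (text : String), Dom_charnum text → Spec_charnum text (charnum text)

-- ===== LEMMAS AND PROOFS =====

-- str.count with a single-character needle is the element count
lemma count_go_single (c : Char) : ∀ (fuel : ℕ) (l : List Char) (acc : ℕ), l.length ≤ fuel →
    PySem.Chars.count.go [c] fuel l acc = acc + l.count c := by
  intro fuel
  induction fuel with
  | zero => intro l acc h; cases l with
      | nil => simp [PySem.Chars.count.go]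
      | cons x t => simp at h
  | succ n ih =>
      intro l acc h
      cases l with
      | nil => simp [PySem.Chars.count.go]
      | cons x t =>
          simp only [PySem.Chars.count.go, List.isPrefixOf, Bool.and_true]
          by_cases hx : c = x
          · subst hx
            simp only [BEq.refl, if_pos, List.length_cons, List.length_nil, Nat.zero_add,
              List.drop_succ_cons, List.drop_zero]
            rw [ih t (acc + 1) (by simpa using h)]
            simp
            omega
          · have hb : (c == x) = false := by simp [hx]
            simp only [hb, if_neg, Bool.false_eq_true, not_false_iff]
            rw [ih t acc (by simpa using h)]
            simp [Ne.symm hx]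

lemma chars_count_single (l : List Char) (c : Char) :
    PySem.Chars.count l [c] = l.count c := by
  simp [PySem.Chars.count, count_go_single c l.length l 0 le_rfl]

-- the single-char-string key map is injective
lemma ofList_single_inj : Function.Injective (fun c : Char => String.ofList [c]) := by
  intro a b h
  have := congrArg String.toList h
  simp at this
  exact this

-- find? with a beq-predicate returns the element itself when present, none otherwise
lemma find?_beq_of_mem {α : Type} [BEq α] [LawfulBEq α] (l : List α) (x : α) (h : x ∈ l) :
    l.find? (fun y => y == x) = some x := by
  induction l with
  | nil => cases h
  | cons y t ih =>
      by_cases hyx : y = x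
      · subst hyx; simp
      · have : x ∈ t := by
          rcases List.mem_cons.mp h with h' | h'
          · exact absurd h'.symm hyx
          · exact h'
        simp [hyx, ih this]

-- PySem.Set.ofList over a snoc
lemma ofList_snoc {α : Type} [BEq α] (l : List α) (x : α) :
    PySem.Set.ofList (l ++ [x]) = PySem.Set.add (PySem.Set.ofList l) x := by
  simp [PySem.Set.ofList, List.foldl_append]

-- Set membership as boolean contains
lemma set_contains_iff {α : Type} [BEq α] [LawfulBEq α] (s : PySem.Set α) (x : α) :
    PySem.Set.contains s x = true ↔ x ∈ s := by
  simp [PySem.Set.contains]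

-- dedup commutes with an injective map
lemma ofList_map_inj {α β : Type} [BEq α] [LawfulBEq α] [BEq β] [LawfulBEq β]
    (f : α → β) (hf : Function.Injective f) (l : List α) :
    PySem.Set.ofList (l.map f) = (PySem.Set.ofList l).map f := by
  induction l using List.reverseRecOn with
  | nil => simp [PySem.Set.ofList]
  | append_singleton t x ih =>
      rw [List.map_append, List.map_singleton, ofList_snoc, ofList_snoc, ih]
      by_cases hx : x ∈ PySem.Set.ofList t
      · have h1 : PySem.Set.contains (PySem.Set.ofList t) x = true := (set_contains_iff _ _).mpr hx
        have h2 : PySem.Set.contains ((PySem.Set.ofList t).map f) (f x) = true := by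
          rw [set_contains_iff]; exact List.mem_map_of_mem hx
        simp only [PySem.Set.add]
        rw [if_pos h2, if_pos h1]
      · have h1 : PySem.Set.contains (PySem.Set.ofList t) x = false := by
          rw [Bool.eq_false_iff]
          intro hc
          exact hx ((set_contains_iff _ _).mp hc)
        have h2 : PySem.Set.contains ((PySem.Set.ofList t).map f) (f x) = false := by
          rw [Bool.eq_false_iff]
          intro hc
          obtain ⟨a, ha, hfa⟩ := List.mem_map.mp ((set_contains_iff _ _).mp hc)
          exact hx (hf hfa ▸ ha)
        simp only [PySem.Set.add]
        rw [if_neg (by rw [h2]; simp), if_neg (by rw [h1]; simp), List.map_append, List.map_singleton]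

-- one step of A's dict update, on a dict that is a counter table for `pre`
lemma dict_step (pre : List String) (x : String) :
    (match (PySem.Dict.mk ((PySem.Set.ofList pre).map
        (fun k => (k, (List.count k pre : Int))))).get? x with
     | some v => (PySem.Dict.mk ((PySem.Set.ofList pre).map
        (fun k => (k, (List.count k pre : Int))))).insert x (v + 1)
     | none   => (PySem.Dict.mk ((PySem.Set.ofList pre).map
        (fun k => (k, (List.count k pre : Int))))).insert x 1)
    = PySem.Dict.mk ((PySem.Set.ofList (pre ++ [x])).map
        (fun k => (k, (List.count k (pre ++ [x]) : Int)))) := by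
  by_cases hx : x ∈ pre
  · -- key present: the entry for x is overwritten with count+1, others unchanged
    have hxs : x ∈ PySem.Set.ofList pre := (PySem.Set.mem_ofList pre x).mpr hx
    have hget : (PySem.Dict.mk ((PySem.Set.ofList pre).map
        (fun k => (k, (List.count k pre : Int))))).get? x = some (List.count x pre : Int) := by
      show Option.map _ (List.find? _ _) = _
      rw [List.find?_map]
      rw [show ((fun (p : String × Int) => p.1 == x) ∘ fun k => (k, (List.count k pre : Int)))
            = fun k => k == x from rfl]
      rw [find?_beq_of_mem _ x hxs]
      rfl
    rw [hget]
    have hcont : (PySem.Dict.mk ((PySem.Set.ofList pre).map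
        (fun k => (k, (List.count k pre : Int))))).contains x = true := by
      simp only [PySem.Dict.contains, List.any_map, List.any_eq_true]
      exact ⟨x, hxs, by simp⟩
    have hof : PySem.Set.ofList (pre ++ [x]) = PySem.Set.ofList pre := by
      rw [ofList_snoc]
      simp only [PySem.Set.add]
      rw [if_pos ((set_contains_iff _ _).mpr hxs)]
    simp only [PySem.Dict.insert, hcont, if_pos, hof]
    congr 1
    rw [List.map_map]
    apply List.map_congr_left
    intro k hk
    by_cases hkx : k = x
    · subst hkx; simp [List.count_append]
    · have hxb : (x == k) = false := by simp [Ne.symm hkx]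
      simp [Function.comp, hkx, List.count_append, List.count_singleton, hxb]
  · -- key absent: appended at the end with count 1
    have hxs : x ∉ PySem.Set.ofList pre := fun h => hx ((PySem.Set.mem_ofList pre x).mp h)
    have hget : (PySem.Dict.mk ((PySem.Set.ofList pre).map
        (fun k => (k, (List.count k pre : Int))))).get? x = none := by
      show Option.map _ (List.find? _ _) = _
      rw [List.find?_map]
      rw [show ((fun (p : String × Int) => p.1 == x) ∘ fun k => (k, (List.count k pre : Int)))
            = fun k => k == x from rfl]
      have hfn : List.find? (fun (k : String) => k == x) (PySem.Set.ofList pre) = none :=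
        List.find?_eq_none.mpr (fun y hy hb => hxs ((eq_of_beq hb) ▸ hy))
      rw [hfn]
      rfl
    rw [hget]
    have hcont : (PySem.Dict.mk ((PySem.Set.ofList pre).map
        (fun k => (k, (List.count k pre : Int))))).contains x = false := by
      simp only [PySem.Dict.contains, List.any_map, List.any_eq_false]
      intro y hy
      simp only [Function.comp]
      intro h
      exact hxs ((eq_of_beq h) ▸ hy)
    have hof : PySem.Set.ofList (pre ++ [x]) = PySem.Set.ofList pre ++ [x] := by
      rw [ofList_snoc]
      simp only [PySem.Set.add]
      rw [if_neg (fun hc => hxs ((set_contains_iff _ _).mp hc))]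
    simp only [PySem.Dict.insert]
    rw [hcont, if_neg Bool.false_ne_true, hof]
    congr 1
    rw [List.map_append]
    congr 1
    · apply List.map_congr_left
      intro k hk
      have hkx : k ≠ x := fun h => hxs (h ▸ hk)
      have hxb : (x == k) = false := by simp [Ne.symm hkx]
      simp [List.count_append, List.count_singleton, hxb]
    · simp [List.count_append, List.count_eq_zero_of_not_mem hx]

-- A's whole loop produces the counter table of its key sequence
lemma loop_eq (ks : List String) : ∀ (pre : List String),
    List.foldl
      (fun (d : PySem.Dict String Int) (x : String) =>
        match d.get? x with
        | some v => d.insert x (v + 1)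
        | none   => d.insert x 1)
      (PySem.Dict.mk ((PySem.Set.ofList pre).map (fun k => (k, (List.count k pre : Int))))) ks
    = PySem.Dict.mk ((PySem.Set.ofList (pre ++ ks)).map
        (fun k => (k, (List.count k (pre ++ ks) : Int)))) := by
  induction ks with
  | nil => intro pre; simp
  | cons x t ih =>
      intro pre
      rw [List.foldl_cons, dict_step pre x, ih (pre ++ [x]), List.append_assoc]
      rfl

-- ===== VERDICT (by name: the statement is the Claim_ definition above) =====
theorem charnum_spec : Claim_equal_charnum := by
  intro text _
  unfold Spec_charnum charnum charnum_alt
  set lowered := (PySem.Str.lower text).toList with hl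
  set p : Char → Bool := fun c => PySem.Chars.strIsalpha [c] with hp
  -- A's guarded fold is the fold over the filtered, key-mapped list
  have hA : (List.foldl
      (fun (d : PySem.Dict String Int) (c : Char) =>
        if p c then
          match d.get? (String.ofList [c]) with
          | some v => d.insert (String.ofList [c]) (v + 1)
          | none   => d.insert (String.ofList [c]) 1
        else d)
      PySem.Dict.empty lowered)
    = List.foldl
      (fun (d : PySem.Dict String Int) (x : String) =>
        match d.get? x with
        | some v => d.insert x (v + 1)
        | none   => d.insert x 1)
      PySem.Dict.empty ((lowered.filter p).map (fun c => String.ofList [c])) := by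
    rw [List.foldl_map, List.foldl_filter]
  rw [hA]
  have h0 : (PySem.Dict.empty : PySem.Dict String Int)
      = PySem.Dict.mk ((PySem.Set.ofList ([] : List String)).map
          (fun k => (k, (List.count k ([] : List String) : Int)))) := by
    simp [PySem.Dict.empty, PySem.Set.ofList]
  rw [h0, loop_eq _ []]
  simp only [List.nil_append]
  rw [ofList_map_inj _ ofList_single_inj]
  rw [List.map_map]
  unfold PySem.List.dedup
  apply List.map_congr_left
  intro c hc
  have hcf : c ∈ lowered.filter p := (PySem.Set.mem_ofList _ c).mp hc
  have hpc : p c = true := (List.mem_filter.mp hcf).2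
  simp only [Function.comp]
  congr 1
  rw [List.count_map_of_injective _ _ ofList_single_inj]
  rw [chars_count_single]
  rw [List.count_filter (by exact hpc)]
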